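-- pv_equiv track=rewrite | github.com/lganic/Pattern-Recognition-MP1 | qda.py | get_all_labels
-- ===== SOURCE A (Python) =====
-- def get_all_labels(y):
--     output = {}
--     current_index = 0
--
--     for item in y:
--         if item in output:
--             continue
--
--         output[item] = current_index
--
--         current_index += 1
--
--     return output
-- ===== SOURCE B (Python) =====
-- def get_all_labels(y):
--     first = {}
--     for pos in range(len(y) - 1, -1, -1):
--         first[y[pos]] = pos
--     ordered = sorted(first.items(), key=lambda kv: kv[1])
--     return {lab: rank for rank, (lab, _) in enumerate(ordered)}
-- ===== Notes on version B (the rewrite author's own statement) =====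
-- stated objective: alternative
-- what changed: B drops A's seen-dict membership guard and running counter: a reversed overwrite pass records each label's first-occurrence position, the (label, position) pairs are sorted by position, and ranks are assigned by enumeration.
import Mathlib
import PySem

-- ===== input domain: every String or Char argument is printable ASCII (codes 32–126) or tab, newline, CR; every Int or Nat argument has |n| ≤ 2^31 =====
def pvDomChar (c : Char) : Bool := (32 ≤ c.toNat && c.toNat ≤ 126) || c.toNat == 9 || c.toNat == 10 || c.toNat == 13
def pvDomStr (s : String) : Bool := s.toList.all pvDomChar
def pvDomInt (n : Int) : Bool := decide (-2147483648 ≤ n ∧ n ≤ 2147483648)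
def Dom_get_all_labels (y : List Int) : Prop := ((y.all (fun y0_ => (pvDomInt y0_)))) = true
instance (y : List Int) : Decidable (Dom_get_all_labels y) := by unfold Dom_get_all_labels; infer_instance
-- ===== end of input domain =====

-- B replaces A's guarded forward pass with a seen-dict and running counter by a different
-- algorithm: a reversed overwrite pass records each label's first-occurrence position, the
-- (label, position) pairs are sorted by position, and ranks are assigned (objective: alternative).

-- ===== PORT A =====
def get_all_labels (y : List Int) : List (Int × Int) :=
  (y.foldl
    (fun (st : PySem.Dict Int Int × Int) item =>
      if st.1.contains item then st
      else (st.1.insert item st.2, st.2 + 1))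
    (PySem.Dict.empty, 0)).1.items

-- ===== PORT B =====
def get_all_labels_alt (y : List Int) : List (Int × Int) :=
  let first := (PySem.List.pyRange ((y.length : Int) - 1) (-1) (-1)).foldl
      (fun (d : PySem.Dict Int Int) pos => d.insert (PySem.List.pyGetD y pos 0) pos)
      PySem.Dict.empty
  let ordered := PySem.List.sorted first.items (fun kv => kv.2) false
  ((PySem.List.enumerate ordered 0).foldl
      (fun (d : PySem.Dict Int Int) p => d.insert p.2.1 p.1)
      PySem.Dict.empty).items

-- ===== PRECONDITION & SPEC =====
def Spec_get_all_labels (y : List Int) (out : List (Int × Int)) : Prop := out = get_all_labels_alt y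
instance (y : List Int) (out : List (Int × Int)) : Decidable (Spec_get_all_labels y out) := by unfold Spec_get_all_labels; infer_instance

-- ===== CLAIM (what is proved, stated in full; the proofs are below) =====
def Claim_equal_get_all_labels : Prop := ∀ (y : List Int), Dom_get_all_labels y → Spec_get_all_labels y (get_all_labels y)

-- ===== LEMMAS AND PROOFS =====

-- the dict mapping the distinct labels of s (in order) to 0,1,2,…
def pvSeenDict (s : List Int) : PySem.Dict Int Int :=
  PySem.Dict.mk ((PySem.List.enumerate s 0).map (fun p => (p.2, p.1)))

lemma pvSeenDict_keys (s : List Int) : (pvSeenDict s).keys = s := by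
  simp [pvSeenDict, PySem.Dict.keys, List.map_map, Function.comp_def,
    PySem.List.map_snd_enumerate]

lemma pvSeenDict_contains (s : List Int) (x : Int) :
    (pvSeenDict s).contains x = decide (x ∈ s) := by
  have hiff := PySem.Dict.contains_iff_mem_keys (d := pvSeenDict s) (k := x)
  rw [pvSeenDict_keys] at hiff
  by_cases hx : x ∈ s
  · simp [hx, hiff.mpr hx]
  · have hf : (pvSeenDict s).contains x = false := by
      rw [Bool.eq_false_iff]; intro hc; exact hx (hiff.mp hc)
    simp [hx, hf]

lemma pvSeenDict_snoc (s : List Int) (x : Int) :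
    pvSeenDict (s ++ [x]) = PySem.Dict.mk ((pvSeenDict s).items ++ [(x, (s.length : Int))]) := by
  simp [pvSeenDict, PySem.List.enumerate_append]

lemma pvFold_inv (y s : List Int) :
    y.foldl
      (fun (st : PySem.Dict Int Int × Int) item =>
        if st.1.contains item then st
        else (st.1.insert item st.2, st.2 + 1))
      (pvSeenDict s, (s.length : Int))
    = (pvSeenDict (PySem.Set.update s y), ((PySem.Set.update s y).length : Int)) := by
  induction y generalizing s with
  | nil => simp [PySem.Set.update]
  | cons a ys ih =>
    by_cases ha : a ∈ s
    · have hc : (pvSeenDict s).contains a = true := by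
        rw [pvSeenDict_contains]; simpa using ha
      have hadd : PySem.Set.add s a = s := by
        simp [PySem.Set.add, ha]
      simp only [List.foldl_cons, hc, if_true]
      rw [ih s]
      simp [PySem.Set.update, hadd]
    · have hc : (pvSeenDict s).contains a = false := by
        rw [pvSeenDict_contains]; simpa using ha
      have hadd : PySem.Set.add s a = s ++ [a] := by
        simp [PySem.Set.add, ha]
      simp only [List.foldl_cons, hc, if_false, Bool.false_eq_true]
      have hins : (pvSeenDict s).insert a (s.length : Int) = pvSeenDict (s ++ [a]) := by
        apply PySem.Dict.ext
        rw [PySem.Dict.items_insert_of_not_contains _ _ hc, pvSeenDict_snoc]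
      rw [hins]
      have hlen : ((s ++ [a]).length : Int) = (s.length : Int) + 1 := by simp
      rw [← hlen, ih (s ++ [a])]
      simp [PySem.Set.update, hadd]

lemma pvA_eq (y : List Int) : get_all_labels y = (pvSeenDict (PySem.Set.ofList y)).items := by
  unfold get_all_labels
  have h0 : (PySem.Dict.empty : PySem.Dict Int Int) = pvSeenDict [] := rfl
  rw [h0]
  have : ((0 : Int)) = (([] : List Int).length : Int) := by simp
  rw [this, pvFold_inv y []]
  have : PySem.Set.update ([] : List Int) y = PySem.Set.ofList y := by
    simp [PySem.Set.update, PySem.Set.ofList_eq_foldl]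
  rw [this]

-- B-side helpers

lemma pvTake_succ (y : List Int) (n : Nat) (h : n < y.length) :
    y.take (n + 1) = y.take n ++ [y[n]] := by
  rw [List.take_add_one, List.getElem?_eq_getElem h]; rfl

lemma pvIdxOf_eq (y : List Int) (n : Nat) (h : n < y.length) (a : Int)
    (hy : y[n] = a) (h2 : a ∉ y.take n) : List.idxOf a y = n := by
  conv_lhs => rw [← List.take_append_drop n y]
  rw [List.idxOf_append, if_neg h2, List.drop_eq_getElem_cons h, hy, List.idxOf_cons]
  simp [List.length_take, Nat.min_eq_left (le_of_lt h)]

lemma pvEnumerate_map (l : List Int) (f : Int → Int × Int) (s : Int) :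
    PySem.List.enumerate (l.map f) s = (PySem.List.enumerate l s).map (fun p => (p.1, f p.2)) := by
  induction l generalizing s with
  | nil => rfl
  | cons a t ih => simp [PySem.List.enumerate_cons, ih]

-- the reversed index loop visits positions n-1, …, 0, i.e. reads y.take n backwards
lemma pvRangeMap (y : List Int) (n : Nat) (hn : n ≤ y.length) :
    (PySem.List.pyRange ((n : Int) - 1) (-1) (-1)).map (fun pos => PySem.List.pyGetD y pos 0)
      = (y.take n).reverse := by
  induction n with
  | zero =>
    have h0 : ((0 : Nat) : Int) - 1 = -1 := by norm_num
    rw [h0, (by decide : PySem.List.pyRange (-1) (-1) (-1) = ([] : List Int))]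
    simp
  | succ n ih =>
    have hlt : n < y.length := by omega
    have hc : (((n + 1 : Nat)) : Int) - 1 = (n : Int) := by push_cast; ring
    rw [hc, PySem.List.pyRange_neg_one_cons (by omega), List.map_cons,
      PySem.List.pyGetD_natCast, ih (by omega), pvTake_succ y n hlt, List.reverse_append,
      List.getD_eq_getElem y 0 hlt]
    rfl

lemma pvFirst_get? (y : List Int) (k : Int) (n : Nat) (hn : n ≤ y.length) (d : PySem.Dict Int Int) :
    ((PySem.List.pyRange ((n : Int) - 1) (-1) (-1)).foldl
        (fun d pos => d.insert (PySem.List.pyGetD y pos 0) pos) d).get? k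
      = if k ∈ y.take n then some ((List.idxOf k y : Nat) : Int) else d.get? k := by
  induction n generalizing d with
  | zero =>
    have h0 : ((0 : Nat) : Int) - 1 = -1 := by norm_num
    rw [h0, (by decide : PySem.List.pyRange (-1) (-1) (-1) = ([] : List Int))]
    simp
  | succ n ih =>
    have hlt : n < y.length := by omega
    have hc : (((n + 1 : Nat)) : Int) - 1 = (n : Int) := by push_cast; ring
    rw [hc, PySem.List.pyRange_neg_one_cons (by omega), List.foldl_cons, ih (by omega),
      PySem.List.pyGetD_natCast, List.getD_eq_getElem y 0 hlt]
    by_cases h1 : k ∈ y.take n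
    · rw [if_pos h1, if_pos (by rw [pvTake_succ y n hlt]; exact List.mem_append_left _ h1)]
    · rw [if_neg h1, PySem.Dict.get?_insert]
      by_cases h2 : k = y[n]
      · rw [if_pos h2, if_pos (by
          rw [pvTake_succ y n hlt]
          exact List.mem_append_right _ (by rw [h2]; exact List.mem_singleton_self _)),
          pvIdxOf_eq y n hlt k h2.symm h1]
      · rw [if_neg h2, if_neg (by
          rw [pvTake_succ y n hlt]
          intro hmem
          rcases List.mem_append.mp hmem with hmem' | hmem'
          · exact h1 hmem'
          · exact h2 (List.mem_singleton.mp hmem'))]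

-- distinct labels in first-occurrence order have strictly increasing first indices
lemma pvOfList_pairwise (y : List Int) :
    (PySem.Set.ofList y).Pairwise (fun a b => List.idxOf a y < List.idxOf b y) := by
  induction y using List.reverseRecOn with
  | nil => simp [PySem.Set.ofList_eq_foldl]
  | append_singleton ys x ih =>
    have hof : PySem.Set.ofList (ys ++ [x]) = PySem.Set.add (PySem.Set.ofList ys) x := by
      simp [PySem.Set.ofList_eq_foldl, List.foldl_append]
    by_cases hx : x ∈ ys
    · have hmem : x ∈ PySem.Set.ofList ys := by rw [PySem.Set.mem_ofList]; exact hx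
      rw [hof, (by simp [PySem.Set.add, hmem] : PySem.Set.add (PySem.Set.ofList ys) x = PySem.Set.ofList ys)]
      refine ih.imp_of_mem ?_
      intro a b ha hb hab
      have ha' : a ∈ ys := (PySem.Set.mem_ofList _ _).mp ha
      have hb' : b ∈ ys := (PySem.Set.mem_ofList _ _).mp hb
      rw [List.idxOf_append, if_pos ha', List.idxOf_append, if_pos hb']
      exact hab
    · have hmem : x ∉ PySem.Set.ofList ys := by rw [PySem.Set.mem_ofList]; exact hx
      rw [hof, (by simp [PySem.Set.add, hmem] : PySem.Set.add (PySem.Set.ofList ys) x = PySem.Set.ofList ys ++ [x])]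
      rw [List.pairwise_append]
      refine ⟨?_, by simp, ?_⟩
      · refine ih.imp_of_mem ?_
        intro a b ha hb hab
        have ha' : a ∈ ys := (PySem.Set.mem_ofList _ _).mp ha
        have hb' : b ∈ ys := (PySem.Set.mem_ofList _ _).mp hb
        rw [List.idxOf_append, if_pos ha', List.idxOf_append, if_pos hb']
        exact hab
      · intro a ha b hb
        have ha' : a ∈ ys := (PySem.Set.mem_ofList _ _).mp ha
        have hb' : b = x := by simpa using hb
        rw [List.idxOf_append, if_pos ha', hb', List.idxOf_append, if_neg hx, List.idxOf_cons]
        simp only [BEq.rfl, cond_true]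
        calc List.idxOf a ys < ys.length := List.idxOf_lt_length_iff.mpr ha'
          _ ≤ 0 + ys.length := by omega

def pvFirstD (y : List Int) : PySem.Dict Int Int :=
  (PySem.List.pyRange ((y.length : Int) - 1) (-1) (-1)).foldl
    (fun (d : PySem.Dict Int Int) pos => d.insert (PySem.List.pyGetD y pos 0) pos)
    PySem.Dict.empty

def pvG (y : List Int) : Int → Int × Int := fun k => (k, ((List.idxOf k y : Nat) : Int))

lemma pvFirstD_keys (y : List Int) : (pvFirstD y).keys = PySem.Set.ofList y.reverse := by
  unfold pvFirstD
  rw [PySem.Dict.keys_foldl_insert_key _ (fun pos => PySem.List.pyGetD y pos 0)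
    (fun _ pos => pos) PySem.Dict.empty, PySem.Dict.keys_empty,
    pvRangeMap y y.length (le_refl _), List.take_length]
  simp [PySem.Set.update, PySem.Set.ofList_eq_foldl]

lemma pvFirstD_items (y : List Int) :
    (pvFirstD y).items = (PySem.Set.ofList y.reverse).map (pvG y) := by
  have hnodup : (pvFirstD y).keys.Nodup := by
    rw [pvFirstD_keys]; exact PySem.Set.nodup_ofList _
  rw [PySem.Dict.items_eq_map_keys (pvFirstD y) hnodup 0, pvFirstD_keys]
  refine List.map_congr_left ?_
  intro k hk
  have hk' : k ∈ y := by
    have := (PySem.Set.mem_ofList _ _).mp hk; simpa using this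
  have hget : (pvFirstD y).get? k = some ((List.idxOf k y : Nat) : Int) := by
    unfold pvFirstD
    rw [pvFirst_get? y k y.length (le_refl _) PySem.Dict.empty, List.take_length, if_pos hk']
  rw [PySem.Dict.getD_eq_get?_getD, hget]
  rfl

lemma pvSorted_first (y : List Int) :
    PySem.List.sorted (pvFirstD y).items (fun kv => kv.2) false
      = (PySem.Set.ofList y).map (pvG y) := by
  have hkeysperm : (PySem.Set.ofList y.reverse).Perm (PySem.Set.ofList y) := by
    rw [List.perm_ext_iff_of_nodup (PySem.Set.nodup_ofList _) (PySem.Set.nodup_ofList _)]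
    intro a; simp [PySem.Set.mem_ofList]
  have hperm : ((PySem.Set.ofList y).map (pvG y)).Perm (pvFirstD y).items := by
    rw [pvFirstD_items]; exact (hkeysperm.map (pvG y)).symm
  have hpair : ((PySem.Set.ofList y).map (pvG y)).Pairwise (fun p q => p.2 < q.2) := by
    rw [List.pairwise_map]
    refine (pvOfList_pairwise y).imp ?_
    intro a b hab
    simpa [pvG] using hab
  exact PySem.List.sorted_eq_of_perm_of_pairwise_lt (pvFirstD y).items _ (fun kv => kv.2) hperm hpair

lemma pvB_eq (y : List Int) : get_all_labels_alt y = (pvSeenDict (PySem.Set.ofList y)).items := by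
  show ((PySem.List.enumerate
      (PySem.List.sorted (pvFirstD y).items (fun kv => kv.2) false) 0).foldl
      (fun (d : PySem.Dict Int Int) p => d.insert p.2.1 p.1)
      PySem.Dict.empty).items = _
  rw [pvSorted_first]
  have hfresh := PySem.Dict.items_foldl_insert_fresh
      (l := PySem.List.enumerate ((PySem.Set.ofList y).map (pvG y)) 0)
      (k := fun p => p.2.1) (v := fun p => p.1) (d := PySem.Dict.empty)
      (by intro a _; simp [PySem.Dict.contains_empty])
      (by
        have hmap : (PySem.List.enumerate ((PySem.Set.ofList y).map (pvG y)) 0).map (fun p => p.2.1)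
            = ((PySem.List.enumerate ((PySem.Set.ofList y).map (pvG y)) 0).map (fun p => p.2)).map
                (fun q => q.1) := by
          rw [List.map_map]; rfl
        rw [hmap, PySem.List.map_snd_enumerate, List.map_map]
        have : (fun (q : Int × Int) => q.1) ∘ (pvG y) = id := by funext k; rfl
        rw [this, List.map_id]
        exact PySem.Set.nodup_ofList _)
  rw [hfresh, pvEnumerate_map]
  simp [PySem.Dict.empty, pvSeenDict, List.map_map, Function.comp_def, pvG]

-- ===== VERDICT (by name: the statement is the Claim_ definition above) =====
theorem get_all_labels_spec : Claim_equal_get_all_labels := by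
  intro y _
  unfold Spec_get_all_labels
  rw [pvA_eq, pvB_eq]
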